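-- pv_equiv track=rewrite | github.com/gircode/testncod | ncod/slave/device/virtualhere.py | _parse_device_list
-- ===== SOURCE A (Python) =====
-- from typing import List, Dict, Any, Optional
--
-- def _parse_device_list(output: str) -> List[Dict[str, Any]]:
--     """解析设备列表输出"""
--     devices = []
--     current_device = {}
--
--     for line in output.splitlines():
--         line = line.strip()
--         if not line:
--             continue
--
--         if line.startswith("Device "):
--             if current_device:
--                 devices.append(current_device)
--             current_device = {"id": line.split()[1]}
--         elif ":" in line:
--             key, value = line.split(":", 1)
--             current_device[key.strip().lower()] = value.strip()
--
--     if current_device: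
--         devices.append(current_device)
--
--     return devices
-- ===== SOURCE B (Python) =====
-- from typing import List, Dict, Any
--
-- def _parse_block(block: List[str]) -> Dict[str, Any]:
--     d = {}
--     rest = block
--     if block and block[0].startswith("Device "):
--         d["id"] = block[0].split()[1]
--         rest = block[1:]
--     for ln in rest:
--         if ":" in ln:
--             key, value = ln.split(":", 1)
--             d[key.strip().lower()] = value.strip()
--     return d
--
-- def _parse_device_list(output: str) -> List[Dict[str, Any]]:
--     lines = [s for s in (ln.strip() for ln in output.splitlines()) if s]
--     blocks, cur = [], []
--     for ln in lines:
--         if ln.startswith("Device "):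
--             blocks.append(cur)
--             cur = [ln]
--         else:
--             cur.append(ln)
--     blocks.append(cur)
--     return [d for d in map(_parse_block, blocks) if d]
-- ===== Notes on version B (the rewrite author's own statement) =====
-- stated objective: alternative
-- what changed: B replaces A's accumulate-and-flush loop (one dict carried across lines, flushed at each header and at the end) with a group-then-transform pipeline: normalize to non-empty stripped lines, partition them into blocks at 'Device ' headers, map each block independently to a dict, and keep the non-empty dicts.
import Mathlib
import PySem

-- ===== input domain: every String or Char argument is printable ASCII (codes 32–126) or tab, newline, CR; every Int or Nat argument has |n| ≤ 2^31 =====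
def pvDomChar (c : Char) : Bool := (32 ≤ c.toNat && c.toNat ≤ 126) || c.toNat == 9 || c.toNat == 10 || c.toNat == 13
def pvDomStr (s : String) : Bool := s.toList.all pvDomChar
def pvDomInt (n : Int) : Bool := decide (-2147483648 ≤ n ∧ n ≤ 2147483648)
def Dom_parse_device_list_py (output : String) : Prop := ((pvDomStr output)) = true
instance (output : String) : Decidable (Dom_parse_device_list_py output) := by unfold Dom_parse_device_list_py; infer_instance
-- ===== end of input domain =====

-- B restructures A's accumulate-and-flush loop as 'group lines into header-blocks, then map each block to a dict'; same cost (alternative decomposition).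

-- ===== PORT A =====
-- one iteration of A's loop body (state: devices so far, current_device)
def pvA_line (st : List (PySem.Dict String String) × PySem.Dict String String) (line0 : String) :
    List (PySem.Dict String String) × PySem.Dict String String :=
  let line := PySem.Str.strip line0
  if line == "" then st
  else if PySem.Str.startswith line "Device " then
    -- line.split()[1]: a stripped line starting with "Device " always has a 2nd word, so the
    -- IndexError branch is unreachable; getD "" is exact here
    ((if st.2.items == [] then st.1 else st.1 ++ [st.2]),
      PySem.Dict.ofList [("id", PySem.List.pyGetD (PySem.Str.split₀ line) 1 "")])
  else if PySem.Str.isIn ":" line then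
    -- line.split(":", 1) with ":" in line always yields exactly two pieces
    let parts := (PySem.Str.splitMax? line ":" 1).getD []
    (st.1, st.2.insert (PySem.Str.lower (PySem.Str.strip (PySem.List.pyGetD parts 0 "")))
                       (PySem.Str.strip (PySem.List.pyGetD parts 1 "")))
  else st

def parse_device_list_py (output : String) : List (List (String × String)) :=
  let st := (PySem.Str.splitlines output).foldl pvA_line ([], PySem.Dict.empty)
  (if st.2.items == [] then st.1 else st.1 ++ [st.2]).map (·.items)

-- ===== PORT B =====
-- parse one block: optional "Device " header line, then the ':' lines
def pvB_addkv (d : PySem.Dict String String) (ln : String) : PySem.Dict String String :=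
  if PySem.Str.isIn ":" ln then
    let parts := (PySem.Str.splitMax? ln ":" 1).getD []
    d.insert (PySem.Str.lower (PySem.Str.strip (PySem.List.pyGetD parts 0 "")))
             (PySem.Str.strip (PySem.List.pyGetD parts 1 ""))
  else d

def pvB_parse_block (block : List String) : PySem.Dict String String :=
  let init : PySem.Dict String String × List String :=
    match block with
    | [] => (PySem.Dict.empty, [])
    | b0 :: rest =>
      if PySem.Str.startswith b0 "Device "
      then (PySem.Dict.empty.insert "id" (PySem.List.pyGetD (PySem.Str.split₀ b0) 1 ""), rest)
      else (PySem.Dict.empty, b0 :: rest)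
  init.2.foldl pvB_addkv init.1

def parse_device_list_py_alt (output : String) : List (List (String × String)) :=
  let lines := ((PySem.Str.splitlines output).map PySem.Str.strip).filter (fun s => !(s == ""))
  let st := lines.foldl
    (fun (st : List (List String) × List String) ln =>
      if PySem.Str.startswith ln "Device " then (st.1 ++ [st.2], [ln]) else (st.1, st.2 ++ [ln]))
    ([], [])
  let blocks := st.1 ++ [st.2]
  ((blocks.map pvB_parse_block).filter (fun d => !(d.items == []))).map (·.items)

-- ===== PRECONDITION & SPEC =====
def Spec_parse_device_list_py (output : String) (out : List (List (String × String))) : Prop := out = parse_device_list_py_alt output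
instance (output : String) (out : List (List (String × String))) : Decidable (Spec_parse_device_list_py output out) := by unfold Spec_parse_device_list_py; infer_instance

-- ===== CLAIM (what is proved, stated in full; the proofs are below) =====
def Claim_equal_parse_device_list_py : Prop := ∀ (output : String), Dom_parse_device_list_py output → Spec_parse_device_list_py output (parse_device_list_py output)

-- ===== LEMMAS AND PROOFS =====

-- flush: append current_device if non-empty
def pvFinal (st : List (PySem.Dict String String) × PySem.Dict String String) :
    List (PySem.Dict String String) :=
  if st.2.items == [] then st.1 else st.1 ++ [st.2]

-- A's body on an already-stripped non-empty line
def pvA_body (st : List (PySem.Dict String String) × PySem.Dict String String) (ln : String) :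
    List (PySem.Dict String String) × PySem.Dict String String :=
  if PySem.Str.startswith ln "Device " then
    (pvFinal st, PySem.Dict.ofList [("id", PySem.List.pyGetD (PySem.Str.split₀ ln) 1 "")])
  else (st.1, pvB_addkv st.2 ln)

-- the sequence of block-dicts produced from lines, starting with current dict d
def pvBlocksDicts (d : PySem.Dict String String) : List String → List (PySem.Dict String String)
  | [] => [d]
  | ln :: ls =>
    if PySem.Str.startswith ln "Device "
    then d :: pvBlocksDicts (PySem.Dict.ofList [("id", PySem.List.pyGetD (PySem.Str.split₀ ln) 1 "")]) ls
    else pvBlocksDicts (pvB_addkv d ln) ls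

-- B's grouping loop, recursively
def pvGroup (cur : List String) : List String → List (List String)
  | [] => [cur]
  | ln :: ls =>
    if PySem.Str.startswith ln "Device " then cur :: pvGroup [ln] ls else pvGroup (cur ++ [ln]) ls

theorem pvFinal_def (st : List (PySem.Dict String String) × PySem.Dict String String) :
    (if st.2.items == [] then st.1 else st.1 ++ [st.2]) = pvFinal st := rfl

theorem pvA_line_eq_body (st : List (PySem.Dict String String) × PySem.Dict String String)
    (a : String) (h : ¬ (PySem.Str.strip a == "") = true) :
    pvA_line st a = pvA_body st (PySem.Str.strip a) := by
  simp only [pvA_line, pvA_body, pvB_addkv, pvFinal]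
  rw [if_neg h]
  by_cases hD : PySem.Str.startswith (PySem.Str.strip a) "Device " = true
  · rw [if_pos hD, if_pos hD]
  · rw [if_neg hD, if_neg hD]
    by_cases hc : PySem.Str.isIn ":" (PySem.Str.strip a) = true
    · rw [if_pos hc, if_pos hc]
    · rw [if_neg hc, if_neg hc]

theorem pvA_strip (ls : List String) (st : List (PySem.Dict String String) × PySem.Dict String String) :
    ls.foldl pvA_line st = ((ls.map PySem.Str.strip).filter (fun s => !(s == ""))).foldl pvA_body st := by
  induction ls generalizing st with
  | nil => rfl
  | cons a t ih =>
    simp only [List.foldl_cons, List.map_cons, List.filter_cons]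
    by_cases h : (PySem.Str.strip a == "") = true
    · rw [if_neg (by simpa using h)]
      rw [show pvA_line st a = st from by simp only [pvA_line]; rw [if_pos h]]
      exact ih st
    · rw [if_pos (by simpa using h), List.foldl_cons, ← ih, pvA_line_eq_body st a h]

theorem pvA_eq_blocks (ls : List String)
    (devs : List (PySem.Dict String String)) (d : PySem.Dict String String) :
    pvFinal (ls.foldl pvA_body (devs, d))
    = devs ++ (pvBlocksDicts d ls).filter (fun d => !(d.items == [])) := by
  induction ls generalizing devs d with
  | nil =>
    simp only [List.foldl_nil, pvBlocksDicts, List.filter_cons, List.filter_nil, pvFinal]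
    by_cases h : (d.items == []) = true
    · rw [if_pos h, if_neg (by simpa using h)]; simp
    · rw [if_neg h, if_pos (by simpa using h)]
  | cons a t ih =>
    simp only [List.foldl_cons, pvBlocksDicts]
    by_cases h : PySem.Str.startswith a "Device " = true
    · rw [if_pos h]
      have hb : pvA_body (devs, d) a
          = (pvFinal (devs, d), PySem.Dict.ofList [("id", PySem.List.pyGetD (PySem.Str.split₀ a) 1 "")]) := by
        simp only [pvA_body]; rw [if_pos h]
      rw [hb, ih, List.filter_cons, pvFinal]
      by_cases hd : (d.items == []) = true
      · rw [if_pos hd, if_neg (by simpa using hd)]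
      · rw [if_neg hd, if_pos (by simpa using hd)]
        simp
    · rw [if_neg h]
      have hb : pvA_body (devs, d) a = (devs, pvB_addkv d a) := by
        simp only [pvA_body]; rw [if_neg h]
      rw [hb]
      exact ih devs (pvB_addkv d a)

theorem pvB_block_header (ln : String) (h : PySem.Str.startswith ln "Device " = true) :
    pvB_parse_block [ln]
    = PySem.Dict.ofList [("id", PySem.List.pyGetD (PySem.Str.split₀ ln) 1 "")] := by
  simp only [pvB_parse_block]
  rw [if_pos h]
  rfl

theorem pvB_block_append (cur : List String) (ln : String)
    (h : ¬ PySem.Str.startswith ln "Device " = true) :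
    pvB_parse_block (cur ++ [ln]) = pvB_addkv (pvB_parse_block cur) ln := by
  cases cur with
  | nil =>
    simp only [List.nil_append, pvB_parse_block]
    rw [if_neg h]
    rfl
  | cons c t =>
    simp only [List.cons_append, pvB_parse_block]
    by_cases hc : PySem.Str.startswith c "Device " = true
    · rw [if_pos hc, if_pos hc]
      simp [List.foldl_append]
    · rw [if_neg hc, if_neg hc]
      simp [List.foldl_append]

theorem pvGroup_eq_blocks (ls : List String) (cur : List String) :
    (pvGroup cur ls).map pvB_parse_block = pvBlocksDicts (pvB_parse_block cur) ls := by
  induction ls generalizing cur with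
  | nil => rfl
  | cons a t ih =>
    simp only [pvGroup, pvBlocksDicts]
    by_cases h : PySem.Str.startswith a "Device " = true
    · rw [if_pos h, if_pos h, List.map_cons, ih, pvB_block_header a h]
    · rw [if_neg h, if_neg h, ih, pvB_block_append cur a h]

theorem pvB_fold_group (ls : List String) (bs : List (List String)) (cur : List String) :
    (ls.foldl
      (fun (st : List (List String) × List String) ln =>
        if PySem.Str.startswith ln "Device " then (st.1 ++ [st.2], [ln]) else (st.1, st.2 ++ [ln]))
      (bs, cur)).1
    ++ [(ls.foldl
      (fun (st : List (List String) × List String) ln =>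
        if PySem.Str.startswith ln "Device " then (st.1 ++ [st.2], [ln]) else (st.1, st.2 ++ [ln]))
      (bs, cur)).2]
    = bs ++ pvGroup cur ls := by
  induction ls generalizing bs cur with
  | nil => rfl
  | cons a t ih =>
    simp only [List.foldl_cons, pvGroup]
    by_cases h : PySem.Str.startswith a "Device " = true
    · rw [if_pos h, if_pos h, ih]
      simp
    · rw [if_neg h, if_neg h, ih]

-- ===== VERDICT (by name: the statement is the Claim_ definition above) =====
theorem parse_device_list_py_spec : Claim_equal_parse_device_list_py := by
  intro output _
  unfold Spec_parse_device_list_py parse_device_list_py parse_device_list_py_alt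
  simp only [pvA_strip, pvFinal_def, pvA_eq_blocks, pvB_fold_group, List.nil_append,
    pvGroup_eq_blocks]
  rfl
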